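-- pv_equiv track=rewrite | github.com/Miner93/recommender | models/kNN.py | combine_users
-- ===== SOURCE A (Python) =====
-- import copy
--
-- def combine_users(user1, user2):
--     user1 = copy.copy(user1)
--     user2 = copy.copy(user2)
--
--     all_keys = set(user1.keys()) | set(user2.keys())
--
--     for key in all_keys:
--         if key not in user1:
--             user1[key] = None
--         if key not in user2:
--             user2[key] = None
--
--     u1 = []
--     u2 = []
--     for key in sorted(user1.keys()):
--         if user1[key] is not None and user2[key] is not None:
--             u1.append(user1[key])
--             u2.append(user2[key])
--
--     return u1, u2
-- ===== SOURCE B (Python) =====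
-- def combine_users(user1, user2):
--     keys = sorted(k for k in user1
--                   if k in user2 and user1[k] is not None and user2[k] is not None)
--     return [user1[k] for k in keys], [user2[k] for k in keys]
-- ===== Notes on version B (the rewrite author's own statement) =====
-- stated objective: simpler
-- what changed: Drops the copy-and-None-fill normalization over the key union entirely: B selects the common non-None keys in one comprehension over user1, sorts that intersection once, and builds both output lists by direct lookup.
import Mathlib
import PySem

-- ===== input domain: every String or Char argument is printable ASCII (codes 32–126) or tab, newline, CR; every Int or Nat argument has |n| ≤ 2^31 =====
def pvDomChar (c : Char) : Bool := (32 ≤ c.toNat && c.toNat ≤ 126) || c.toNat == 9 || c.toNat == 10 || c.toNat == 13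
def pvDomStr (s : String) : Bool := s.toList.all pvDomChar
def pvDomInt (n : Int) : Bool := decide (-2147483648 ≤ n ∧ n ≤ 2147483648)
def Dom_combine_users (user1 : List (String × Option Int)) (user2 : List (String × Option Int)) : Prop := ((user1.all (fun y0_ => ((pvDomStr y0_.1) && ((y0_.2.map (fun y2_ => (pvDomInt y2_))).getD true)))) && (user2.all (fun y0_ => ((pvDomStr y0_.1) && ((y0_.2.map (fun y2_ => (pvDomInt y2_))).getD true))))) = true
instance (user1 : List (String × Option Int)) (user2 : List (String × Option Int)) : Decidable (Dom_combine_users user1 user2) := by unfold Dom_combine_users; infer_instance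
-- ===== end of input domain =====

-- B drops A's copy-and-None-fill normalization over the key union: it gathers the common
-- non-None keys in one pass over user1, sorts them once, and reads both dicts directly (simpler).

-- ===== PORT A =====
-- Literal port of A.  The dict arguments become PySem.Dict values; copy.copy is identity on the
-- return value (A never lets the mutated copies escape).  user1[key] inside the final loop is a
-- plain dict indexing that can never raise there (key ∈ keys after the fill loop), ported as
-- getD key none, which agrees with get? on every reachable key.
def combine_users (user1 : List (String × Option Int)) (user2 : List (String × Option Int)) : List Int × List Int :=
  let d1 := PySem.Dict.ofList user1
  let d2 := PySem.Dict.ofList user2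
  let all_keys := PySem.Set.union (PySem.Set.ofList (PySem.Dict.keys d1)) (PySem.Set.ofList (PySem.Dict.keys d2))
  let filled := all_keys.foldl
    (fun (st : PySem.Dict String (Option Int) × PySem.Dict String (Option Int)) key =>
      ((if st.1.contains key then st.1 else st.1.insert key none),
       (if st.2.contains key then st.2 else st.2.insert key none))) (d1, d2)
  (PySem.List.sorted (PySem.Dict.keys filled.1) (fun k => k) false).foldl
    (fun (u : List Int × List Int) key =>
      match filled.1.getD key none, filled.2.getD key none with
      | some a, some b => (u.1 ++ [a], u.2 ++ [b])
      | _, _ => u) ([], [])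

-- ===== PORT B =====
-- Literal port of Source B.  user1[k] / user2[k] on a selected key are non-None dict reads,
-- ported as (getD k none).getD 0 (the 0 default is never used: the filter guarantees isSome).
def combine_users_alt (user1 : List (String × Option Int)) (user2 : List (String × Option Int)) : List Int × List Int :=
  let d1 := PySem.Dict.ofList user1
  let d2 := PySem.Dict.ofList user2
  let keys := PySem.List.sorted
    ((PySem.Dict.keys d1).filter (fun k =>
      d2.contains k && (d1.getD k none).isSome && (d2.getD k none).isSome)) (fun k => k) false
  (keys.map (fun k => (d1.getD k none).getD 0), keys.map (fun k => (d2.getD k none).getD 0))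

-- ===== PRECONDITION & SPEC =====
def Spec_combine_users (user1 : List (String × Option Int)) (user2 : List (String × Option Int)) (out : List Int × List Int) : Prop := out = combine_users_alt user1 user2
instance (user1 : List (String × Option Int)) (user2 : List (String × Option Int)) (out : List Int × List Int) : Decidable (Spec_combine_users user1 user2 out) := by unfold Spec_combine_users; infer_instance

-- ===== CLAIM (what is proved, stated in full; the proofs are below) =====
def Claim_equal_combine_users : Prop := ∀ (user1 : List (String × Option Int)) (user2 : List (String × Option Int)), Dom_combine_users user1 user2 → Spec_combine_users user1 user2 (combine_users user1 user2)

-- ===== LEMMAS AND PROOFS =====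

-- A's fill loop on one dict.
def pvFill (l : List String) (d : PySem.Dict String (Option Int)) : PySem.Dict String (Option Int) :=
  l.foldl (fun d k => if d.contains k then d else d.insert k none) d

lemma pvFill_get? (l : List String) (d : PySem.Dict String (Option Int)) (k : String) :
    (pvFill l d).get? k =
      match d.get? k with
      | some v => some v
      | none => if k ∈ l then some none else none := by
  induction l generalizing d with
  | nil => cases h : d.get? k <;> simp [pvFill, h]
  | cons a t ih =>
    simp only [pvFill, List.foldl_cons] at *
    by_cases hc : d.contains a = true
    · rw [if_pos hc, ih]
      cases h : d.get? k with
      | some v => rfl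
      | none =>
        rcases eq_or_ne k a with rfl | hne
        · rw [PySem.Dict.contains_eq_isSome_get?, h] at hc; simp at hc
        · simp [hne]
    · rw [if_neg hc, ih]
      rw [PySem.Dict.get?_insert]
      rcases eq_or_ne k a with rfl | hne
      · rw [PySem.Dict.contains_eq_isSome_get?] at hc
        cases h : d.get? k with
        | some v => rw [h] at hc; simp at hc
        | none => simp
      · simp [hne]

lemma pvFill_nodup_keys (l : List String) (d : PySem.Dict String (Option Int))
    (h : d.keys.Nodup) : (pvFill l d).keys.Nodup := by
  induction l generalizing d with
  | nil => exact h
  | cons a t ih =>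
    simp only [pvFill, List.foldl_cons]
    split
    · exact ih d h
    · exact ih _ (PySem.Dict.nodup_keys_insert d a none h)

-- "d[k] exists and is not None", read off getD k none
lemma pvGetD_isSome (d : PySem.Dict String (Option Int)) (k : String) :
    ((d.getD k none).isSome = true) ↔ ∃ a, d.get? k = some (some a) := by
  rw [PySem.Dict.getD_eq_get?_getD]
  cases h : d.get? k with
  | none => simp
  | some v => cases v <;> simp

-- filling never changes that condition
lemma pvFill_getD_isSome (l : List String) (d : PySem.Dict String (Option Int)) (k : String) :
    (((pvFill l d).getD k none).isSome = true) ↔ ∃ a, d.get? k = some (some a) := by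
  rw [PySem.Dict.getD_eq_get?_getD, pvFill_get? l d k]
  cases h : d.get? k with
  | none => by_cases hk : k ∈ l <;> simp [hk]
  | some v => cases v <;> simp

lemma pvFill_get?_of_orig (l : List String) (d : PySem.Dict String (Option Int)) (k : String)
    (v : Option Int) (h : d.get? k = some v) : (pvFill l d).get? k = some v := by
  rw [pvFill_get? l d k, h]

-- The gathering loop with pair state: filter-then-map of the key list.
lemma pvPairFold (F G : String → Option Int) (l : List String) (u1 u2 : List Int) :
    l.foldl (fun (u : List Int × List Int) key =>
        match F key, G key with
        | some a, some b => (u.1 ++ [a], u.2 ++ [b])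
        | _, _ => u) (u1, u2)
    = (u1 ++ (l.filter (fun k => (F k).isSome && (G k).isSome)).map (fun k => (F k).getD 0),
       u2 ++ (l.filter (fun k => (F k).isSome && (G k).isSome)).map (fun k => (G k).getD 0)) := by
  induction l generalizing u1 u2 with
  | nil => simp
  | cons a t ih =>
    simp only [List.foldl_cons, List.filter_cons]
    cases hF : F a <;> cases hG : G a <;>
      simp [hF, hG, ih, List.map_cons, List.append_assoc]

-- a nodup ≤-sorted list is <-sorted
lemma pvPairwiseLt (l : List String) (h1 : l.Pairwise (fun a b => a ≤ b)) (h2 : l.Nodup) :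
    l.Pairwise (fun a b => a < b) :=
  (h1.and h2).imp (fun h => lt_of_le_of_ne h.1 h.2)

-- ===== VERDICT (by name: the statement is the Claim_ definition above) =====
theorem combine_users_spec : Claim_equal_combine_users := by
  intro user1 user2 _
  unfold Spec_combine_users combine_users combine_users_alt
  dsimp only
  set d1 := PySem.Dict.ofList user1 with hd1
  set d2 := PySem.Dict.ofList user2 with hd2
  set L := PySem.Set.union (PySem.Set.ofList (PySem.Dict.keys d1)) (PySem.Set.ofList (PySem.Dict.keys d2)) with hL
  rw [PySem.List.foldl_prod_mk (fun d k => if d.contains k then d else d.insert k none)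
        (fun d k => if d.contains k then d else d.insert k none) L d1 d2]
  have hA1 : L.foldl (fun d k => if d.contains k then d else d.insert k none) d1 = pvFill L d1 := rfl
  have hA2 : L.foldl (fun d k => if d.contains k then d else d.insert k none) d2 = pvFill L d2 := rfl
  rw [hA1, hA2, pvPairFold]
  set A1 := pvFill L d1 with hA1d
  set A2 := pvFill L d2 with hA2d
  set p : String → Bool := fun k => (A1.getD k none).isSome && (A2.getD k none).isSome with hp
  set q : String → Bool := fun k =>
    d2.contains k && (d1.getD k none).isSome && (d2.getD k none).isSome with hq
  -- the shared selection condition, on the original dicts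
  set R : String → Prop := fun k =>
    (∃ a, d1.get? k = some (some a)) ∧ (∃ b, d2.get? k = some (some b)) with hR
  have hpR : ∀ k, p k = true ↔ R k := by
    intro k
    simp only [hp, hR, Bool.and_eq_true, hA1d, hA2d, pvFill_getD_isSome]
  have hqR : ∀ k, q k = true ↔ R k := by
    intro k
    simp only [hq, hR, Bool.and_eq_true, pvGetD_isSome, and_assoc]
    constructor
    · rintro ⟨-, h1, h2⟩; exact ⟨h1, h2⟩
    · rintro ⟨h1, b, h2⟩
      refine ⟨?_, h1, b, h2⟩
      rw [PySem.Dict.contains_eq_isSome_get?, h2]; rfl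
  have hnod1 : d1.keys.Nodup := PySem.Dict.nodup_keys_ofList user1
  have hnodA : A1.keys.Nodup := pvFill_nodup_keys L d1 hnod1
  -- the two key lists coincide
  have hSeq : (PySem.List.sorted A1.keys (fun k => k) false).filter p
      = PySem.List.sorted (d1.keys.filter q) (fun k => k) false := by
    refine (PySem.List.sorted_eq_of_perm_of_pairwise_lt (d1.keys.filter q) _ (fun k => k) ?_ ?_).symm
    · refine ((PySem.List.sorted_perm A1.keys (fun k => k) false).filter p).trans ?_
      refine (List.perm_ext_iff_of_nodup (hnodA.filter p) (hnod1.filter q)).mpr ?_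
      intro k
      simp only [List.mem_filter, hpR, hqR]
      constructor
      · rintro ⟨-, hr⟩
        refine ⟨?_, hr⟩
        rcases hr.1 with ⟨a, ha⟩
        rw [← PySem.Dict.contains_iff_mem_keys, PySem.Dict.contains_eq_isSome_get?, ha]; rfl
      · rintro ⟨-, hr⟩
        refine ⟨?_, hr⟩
        rcases hr.1 with ⟨a, ha⟩
        have := pvFill_get?_of_orig L d1 k (some a) ha
        rw [← PySem.Dict.contains_iff_mem_keys, PySem.Dict.contains_eq_isSome_get?, ← hA1d] at *
        rw [this]; rfl
    · exact List.Pairwise.filter p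
        (pvPairwiseLt _ (PySem.List.sorted_pairwise A1.keys (fun k => k))
          ((PySem.List.sorted_perm A1.keys (fun k => k) false).nodup_iff.mpr hnodA))
  rw [hSeq]
  -- values agree on the selected keys
  have hmemR : ∀ k ∈ PySem.List.sorted (d1.keys.filter q) (fun k => k) false, R k := by
    intro k hk
    have := (PySem.List.mem_sorted (d1.keys.filter q) (fun k => k) false k).mp hk
    exact (hqR k).mp (List.mem_filter.mp this).2
  refine Prod.ext ?_ ?_ <;> simp only [] <;> apply List.map_congr_left <;> intro k hk
  · rcases (hmemR k hk).1 with ⟨a, ha⟩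
    rw [hA1d, PySem.Dict.getD_eq_get?_getD, PySem.Dict.getD_eq_get?_getD,
       pvFill_get?_of_orig L d1 k (some a) ha, ha]
  · rcases (hmemR k hk).2 with ⟨b, hb⟩
    rw [hA2d, PySem.Dict.getD_eq_get?_getD, PySem.Dict.getD_eq_get?_getD,
       pvFill_get?_of_orig L d2 k (some b) hb, hb]
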